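-- pv_equiv track=rewrite | github.com/pypi-data/pypi-mirror-395 | packages/intervalop/intervalop-0.0.1-py3-none-any.whl/intervalop/interval.py | excluding
-- ===== SOURCE A (Python) =====
-- def is_intersecting(A, B):
--     """
--     A = [a, b]
--     B = [c, d]
--     """
--     output = False
--     master = [A, B]
--     master.sort(key=lambda sublist: sublist[0])
--     if master[1][0] <= master[0][1]:
--         output = True
--     return output
--
-- def excluding(A, B):
--     """
--     A = [[a, b], [c, d]]
--     B = [[e, f], [g, h]]
--     """
--     output = []
--     for I in A:
--         remove = False
--         for J in B:
--             if is_intersecting(I, J):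
--                 remove = True
--         if not remove:
--             output.append(I)
--     return output
-- ===== SOURCE B (Python) =====
-- def _bisect_left(a, x):
--     lo, hi = 0, len(a)
--     while lo < hi:
--         mid = (lo + hi) // 2
--         if a[mid] < x:
--             lo = mid + 1
--         else:
--             hi = mid
--     return lo
--
-- def excluding(A, B):
--     """
--     Keep the intervals of A that intersect no interval of B.
--     Preprocess B once: sort it by start, keep the sorted starts and the
--     running maximum of the ends; each A-interval is then answered with one
--     binary search instead of a scan over B.
--     """
--     SB = sorted(B, key=lambda J: J[0])
--     starts = [J[0] for J in SB]
--     prefmax = []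
--     m = None
--     for J in SB:
--         e = J[1]
--         if m is None or e > m:
--             m = e
--         prefmax.append(m)
--     output = []
--     for I in A:
--         lo, hi = I[0], I[1]
--         k = _bisect_left(starts, lo)
--         hit = (k < len(starts) and starts[k] <= hi) or (k > 0 and prefmax[k - 1] >= lo)
--         if not hit:
--             output.append(I)
--     return output
-- ===== Notes on version B (the rewrite author's own statement) =====
-- stated objective: faster
-- what changed: Instead of testing every A-interval against every B-interval, B sorts B by start once, precomputes the sorted starts and a running maximum of ends, and answers each A-interval with one binary search.
-- outside the precondition, e.g. on excluding([[]], []): A returns [[]], B raises IndexError; on excluding([[5]], [[3, 4]]): A returns [[5]], B raises IndexError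
import Mathlib
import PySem

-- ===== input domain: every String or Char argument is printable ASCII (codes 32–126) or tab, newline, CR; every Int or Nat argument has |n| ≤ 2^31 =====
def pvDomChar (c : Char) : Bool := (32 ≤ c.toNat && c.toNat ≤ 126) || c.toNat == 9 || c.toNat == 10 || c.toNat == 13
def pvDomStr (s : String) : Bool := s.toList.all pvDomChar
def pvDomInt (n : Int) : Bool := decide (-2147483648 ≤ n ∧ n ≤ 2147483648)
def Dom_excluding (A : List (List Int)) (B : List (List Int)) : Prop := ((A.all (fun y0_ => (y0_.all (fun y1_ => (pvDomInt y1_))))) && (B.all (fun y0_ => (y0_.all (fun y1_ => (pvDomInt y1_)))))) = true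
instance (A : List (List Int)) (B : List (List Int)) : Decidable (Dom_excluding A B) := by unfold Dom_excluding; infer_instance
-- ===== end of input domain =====

-- B replaces A's all-pairs intersection scan by one sort of B plus a binary search
-- per A-interval (precomputed sorted starts and running maximum of ends).

-- ===== PORT A =====
-- Python list indexing I[0]/J[1] is ported as List.getD, exact on Pre_excluding
-- (every interval carries both endpoints), where the Python indexing never raises.
def is_intersecting (A : List Int) (B : List Int) : Bool :=
  -- master = [A, B]; master.sort(key=lambda s: s[0]) — a stable 2-element sort: swap iff B's key < A's key
  let master := if B.getD 0 0 < A.getD 0 0 then (B, A) else (A, B)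
  decide (master.2.getD 0 0 ≤ master.1.getD 1 0)

def excluding (A : List (List Int)) (B : List (List Int)) : List (List Int) :=
  A.foldl (fun output I =>
    let remove := B.foldl (fun remove J => if is_intersecting I J then true else remove) false
    if remove then output else output ++ [I]) []

-- ===== PORT B =====
-- Source B's hand-written _bisect_left: 'while lo < hi: …', recursion on hi - lo
def bisectGo (a : List Int) (x : Int) (lo hi : Nat) : Nat :=
  if lo < hi then
    let mid := (lo + hi) / 2
    if a.getD mid 0 < x then bisectGo a x (mid + 1) hi else bisectGo a x lo mid
  else lo
termination_by hi - lo
decreasing_by all_goals omega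

def bisect_left (a : List Int) (x : Int) : Nat := bisectGo a x 0 a.length

-- Source B's prefmax-building loop: state m (None before the first element), one entry per J
def prefMaxGo (t : List (List Int)) (m : Option Int) : List Int :=
  match t with
  | [] => []
  | J :: t' =>
    let e := J.getD 1 0
    let m' := match m with
      | none => e
      | some m0 => if e > m0 then e else m0
    m' :: prefMaxGo t' (some m')

def excluding_alt (A : List (List Int)) (B : List (List Int)) : List (List Int) :=
  let SB := PySem.List.sorted B (fun J => J.getD 0 0)
  let starts := SB.map (fun J => J.getD 0 0)
  let prefmax := prefMaxGo SB none
  A.foldl (fun output I =>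
    let lo := I.getD 0 0
    let hi := I.getD 1 0
    let k := bisect_left starts lo
    let hit := (decide (k < starts.length) && decide (starts.getD k 0 ≤ hi))
            || (decide (0 < k) && decide (lo ≤ prefmax.getD (k - 1) 0))
    if hit then output else output ++ [I]) []

-- ===== PRECONDITION & SPEC =====
-- Pre_ excludes inputs containing an interval with fewer than two endpoints: Python A
-- raises IndexError on them except when its comparison order happens never to touch the
-- missing endpoint (e.g. B empty), and Python B itself raises IndexError on them.
def Pre_excluding (A : List (List Int)) (B : List (List Int)) : Prop :=
  (∀ I ∈ A, 2 ≤ I.length) ∧ (∀ J ∈ B, 2 ≤ J.length)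
instance (A : List (List Int)) (B : List (List Int)) : Decidable (Pre_excluding A B) := by
  unfold Pre_excluding; infer_instance

def pvWitness_excluding : List (List Int) × List (List Int) :=
  ([[1, 3], [10, 12]], [[2, 5]])

def Spec_excluding (A : List (List Int)) (B : List (List Int)) (out : List (List Int)) : Prop := out = excluding_alt A B
instance (A : List (List Int)) (B : List (List Int)) (out : List (List Int)) : Decidable (Spec_excluding A B out) := by unfold Spec_excluding; infer_instance

-- ===== CLAIM (what is proved, stated in full; the proofs are below) =====
def Claim_equal_excluding : Prop := ∀ (A : List (List Int)) (B : List (List Int)), Dom_excluding A B → Pre_excluding A B → Spec_excluding A B (excluding A B)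

-- ===== LEMMAS AND PROOFS =====

theorem foldl_or_any (p : List Int → Bool) (l : List (List Int)) (r : Bool) :
    l.foldl (fun r J => if p J then true else r) r = (r || l.any p) := by
  induction l generalizing r with
  | nil => simp
  | cons J t ih =>
    rw [List.foldl_cons, ih, List.any_cons]
    cases p J <;> cases r <;> simp

-- A's intersection test, rewritten by cases on the 2-element sort
def predHit (lo hi : Int) (J : List Int) : Bool :=
  if J.getD 0 0 < lo then decide (lo ≤ J.getD 1 0) else decide (J.getD 0 0 ≤ hi)

theorem is_intersecting_eq (I J : List Int) :
    is_intersecting I J = predHit (I.getD 0 0) (I.getD 1 0) J := by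
  unfold is_intersecting predHit
  split <;> rfl

theorem bisectGo_eq_loop (a : List Int) (x : Int) :
    ∀ fuel lo hi, hi ≤ a.length → hi - lo ≤ fuel →
      bisectGo a x lo hi = PySem.List.bisectLeftLoop a x fuel lo hi := by
  intro fuel
  induction fuel with
  | zero =>
    intro lo hi hle hf
    rw [bisectGo]
    have h : ¬ lo < hi := by omega
    simp [PySem.List.bisectLeftLoop, h]
  | succ fuel ih =>
    intro lo hi hle hf
    rw [bisectGo]
    by_cases hlh : lo < hi
    · have hmid : (lo + hi) / 2 < a.length := by omega
      simp only [PySem.List.bisectLeftLoop, hlh, if_pos, List.getElem?_eq_getElem hmid,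
        List.getD_eq_getElem a 0 hmid]
      split
      · exact ih _ _ hle (by omega)
      · exact ih _ _ (by omega) (by omega)
    · simp [PySem.List.bisectLeftLoop, hlh]


theorem bisect_left_eq (a : List Int) (x : Int) :
    bisect_left a x = PySem.List.bisectLeft a x := by
  unfold bisect_left PySem.List.bisectLeft
  exact bisectGo_eq_loop a x a.length 0 a.length le_rfl (by omega)

theorem prefMaxGo_some_iff (lo : Int) :
    ∀ (t : List (List Int)) (m0 : Int) (i : Nat), i < t.length →
      (lo ≤ (prefMaxGo t (some m0)).getD i 0 ↔
        lo ≤ m0 ∨ ∃ j, j ≤ i ∧ lo ≤ (t.getD j []).getD 1 0) := by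
  intro t
  induction t with
  | nil => intro m0 i h; simp at h
  | cons J t' ih =>
    intro m0 i h
    have hkey : ∀ (e m1 : Int), lo ≤ (if e > m1 then e else m1) ↔ lo ≤ m1 ∨ lo ≤ e := by
      intro e m1; split <;> omega
    match i with
    | 0 =>
      simp only [prefMaxGo, List.getD_cons_zero, Nat.le_zero, exists_eq_left]
      exact hkey _ _
    | i + 1 =>
      simp only [prefMaxGo, List.getD_cons_succ]
      rw [ih _ i (by simpa using h), hkey]
      constructor
      · rintro ((hm | he) | ⟨j, hj, hle⟩)
        · exact Or.inl hm
        · exact Or.inr ⟨0, by omega, by simpa using he⟩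
        · exact Or.inr ⟨j + 1, by omega, by simpa using hle⟩
      · rintro (hm | ⟨j, hj, hle⟩)
        · exact Or.inl (Or.inl hm)
        · match j with
          | 0 => exact Or.inl (Or.inr (by simpa using hle))
          | j + 1 => exact Or.inr ⟨j, by omega, by simpa using hle⟩

theorem prefMaxGo_none_iff (lo : Int) (t : List (List Int)) (i : Nat) (h : i < t.length) :
    lo ≤ (prefMaxGo t none).getD i 0 ↔ ∃ j, j ≤ i ∧ lo ≤ (t.getD j []).getD 1 0 := by
  match t with
  | [] => simp at h
  | J :: t' =>
    match i with
    | 0 => simp [prefMaxGo]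
    | i + 1 =>
      simp only [prefMaxGo, List.getD_cons_succ]
      rw [prefMaxGo_some_iff lo t' _ i (by simpa using h)]
      constructor
      · rintro (hm | ⟨j, hj, hle⟩)
        · exact ⟨0, by omega, by simpa using hm⟩
        · exact ⟨j + 1, by omega, by simpa using hle⟩
      · rintro ⟨j, hj, hle⟩
        match j with
        | 0 => exact Or.inl (by simpa using hle)
        | j + 1 => exact Or.inr ⟨j, by omega, by simpa using hle⟩

theorem hit_eq (B SB : List (List Int)) (hperm : SB.Perm B)
    (hsort : List.Pairwise (fun a b => a ≤ b) (SB.map (fun J => J.getD 0 0))) (lo hi : Int) :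
    ((decide (bisect_left (SB.map (fun J => J.getD 0 0)) lo < (SB.map (fun J => J.getD 0 0)).length)
       && decide ((SB.map (fun J => J.getD 0 0)).getD (bisect_left (SB.map (fun J => J.getD 0 0)) lo) 0 ≤ hi))
     || (decide (0 < bisect_left (SB.map (fun J => J.getD 0 0)) lo)
       && decide (lo ≤ (prefMaxGo SB none).getD (bisect_left (SB.map (fun J => J.getD 0 0)) lo - 1) 0)))
    = B.any (predHit lo hi) := by
  rw [← List.Perm.any_eq hperm]
  rcases PySem.List.bisectLeft_spec (SB.map fun J => J.getD 0 0) lo hsort with ⟨hk_le, hlt, hge⟩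
  rw [← bisect_left_eq] at hk_le hlt hge
  have hmono : ∀ p q (hq : q < (SB.map (fun J => J.getD 0 0)).length) (hpq : p ≤ q),
      (SB.map (fun J => J.getD 0 0))[p]'(by omega) ≤ (SB.map (fun J => J.getD 0 0))[q] := by
    intro p q hq hpq
    rcases Nat.lt_or_ge p q with h | h
    · exact (List.pairwise_iff_getElem.mp hsort) p q (by omega) hq h
    · have : p = q := by omega
      subst this; rfl
  set starts := SB.map (fun J => J.getD 0 0) with hstarts
  set k := bisect_left starts lo with hk
  have hlen : starts.length = SB.length := by simp [hstarts]
  apply Bool.eq_iff_iff.mpr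
  simp only [Bool.or_eq_true, Bool.and_eq_true, decide_eq_true_eq, List.any_eq_true]
  constructor
  · rintro (⟨hkn, hsk⟩ | ⟨hkpos, hpm⟩)
    · refine ⟨SB[k]'(by omega), List.getElem_mem _, ?_⟩
      have hmap : starts[k]'(by omega) = (SB[k]'(by omega)).getD 0 0 := by
        simp [hstarts, List.getElem_map]
      have hslo : lo ≤ (SB[k]'(by omega)).getD 0 0 := by
        rw [← hmap]; exact hge k (by omega) le_rfl
      have hshi : (SB[k]'(by omega)).getD 0 0 ≤ hi := by
        rw [← hmap]; rw [List.getD_eq_getElem starts 0 hkn] at hsk; exact hsk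
      unfold predHit
      rw [if_neg (by omega)]
      exact decide_eq_true hshi
    · have hkn' : k - 1 < SB.length := by omega
      obtain ⟨j, hj, hle⟩ := (prefMaxGo_none_iff lo SB (k - 1) hkn').mp hpm
      have hjn : j < SB.length := by omega
      refine ⟨SB[j], List.getElem_mem _, ?_⟩
      have hmap : starts[j]'(by omega) = (SB[j]).getD 0 0 := by
        simp [hstarts, List.getElem_map]
      have hsj : (SB[j]).getD 0 0 < lo := by
        rw [← hmap]; exact hlt j (by omega) (by omega)
      have hgd : SB.getD j [] = SB[j] := List.getD_eq_getElem SB [] hjn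
      rw [hgd] at hle
      unfold predHit
      rw [if_pos hsj]
      exact decide_eq_true hle
  · rintro ⟨J, hJ, hpred⟩
    obtain ⟨j, hjn, rfl⟩ := List.mem_iff_getElem.mp hJ
    have hmap : starts[j]'(by omega) = (SB[j]).getD 0 0 := by
      simp [hstarts, List.getElem_map]
    unfold predHit at hpred
    by_cases hc : (SB[j]).getD 0 0 < lo
    · rw [if_pos hc] at hpred
      have hle : lo ≤ (SB[j]).getD 1 0 := of_decide_eq_true hpred
      have hjk : j < k := by
        by_contra hjk
        have := hge j (by omega) (by omega)
        rw [hmap] at this; omega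
      right
      refine ⟨by omega, ?_⟩
      have hkn' : k - 1 < SB.length := by omega
      rw [prefMaxGo_none_iff lo SB (k - 1) hkn']
      exact ⟨j, by omega, by rw [List.getD_eq_getElem SB [] hjn]; exact hle⟩
    · rw [if_neg hc] at hpred
      have hshi : (SB[j]).getD 0 0 ≤ hi := of_decide_eq_true hpred
      have hjk : k ≤ j := by
        by_contra hjk
        have := hlt j (by omega) (by omega)
        rw [hmap] at this; omega
      left
      have hkn : k < starts.length := by omega
      refine ⟨hkn, ?_⟩
      rw [List.getD_eq_getElem starts 0 hkn]
      calc starts[k] ≤ starts[j]'(by omega) := hmono k j (by simpa using hjn) hjk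
        _ ≤ hi := by rw [hmap]; omega

-- folds the per-interval equivalence over A for the final goal
theorem hit_eq_all (A B : List (List Int)) :
    (A.foldl (fun output I =>
        if B.any (predHit (I.getD 0 0) (I.getD 1 0)) then output else output ++ [I]) [] :
      List (List Int))
    = (let SB := PySem.List.sorted B (fun J => J.getD 0 0)
       let starts := SB.map (fun J => J.getD 0 0)
       let prefmax := prefMaxGo SB none
       A.foldl (fun output I =>
         let lo := I.getD 0 0
         let hi := I.getD 1 0
         let k := bisect_left starts lo
         let hit := (decide (k < starts.length) && decide (starts.getD k 0 ≤ hi))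
                 || (decide (0 < k) && decide (lo ≤ prefmax.getD (k - 1) 0))
         if hit then output else output ++ [I]) []) := by
  show _ = A.foldl _ []
  congr 1
  funext output I
  simp only [hit_eq B (PySem.List.sorted B (fun J => J.getD 0 0))
      (PySem.List.sorted_perm B (fun J => J.getD 0 0) false)
      (PySem.List.sorted_map_key_pairwise B (fun J => J.getD 0 0))]

-- ===== VERDICT (by name: the statement is the Claim_ definition above) =====
theorem excluding_spec : Claim_equal_excluding := by
  intro A B _ _
  unfold Spec_excluding excluding excluding_alt
  simp only [is_intersecting_eq, foldl_or_any, Bool.false_or]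
  rw [hit_eq_all]
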